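-- pv_equiv track=rewrite | github.com/pypi-data/pypi-mirror-402 | packages/bsv-wallet-toolbox/bsv_wallet_toolbox-2.0.1-py3-none-any.whl/bsv_wallet_toolbox/storage/provider.py | attempt_to_post_reqs_to_network
-- ===== SOURCE A (Python) =====
-- from typing import TYPE_CHECKING, Any, ClassVar, overload
--
-- def attempt_to_post_reqs_to_network(reqs: list[dict[str, Any]]) -> dict[str, Any]:
--     """Attempt to post ProvenTxReq records to the network.
--
--     Tries to send ProvenTxReq (transaction proof requests) to network.
--     In full implementation, would connect to external service; currently
--     counts attempts for instrumentation.
--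
--     Args:
--         reqs: List of ProvenTxReq dictionaries to post
--
--     Returns:
--         dict with keys:
--             - posted (int): Count of successfully posted requests
--             - failed (int): Count of requests that failed to post
--
--     Reference:
--         - toolbox/ts-wallet-toolbox/src/storage/StorageProvider.ts (attemptToPostReqsToNetwork)
--     """
--     posted = 0
--     failed = 0
--
--     for _req in reqs:
--         try:
--             posted += 1
--         except Exception:
--             failed += 1
--
--     return {"posted": posted, "failed": failed}
-- ===== SOURCE B (Python) =====
-- def attempt_to_post_reqs_to_network(reqs):
--     return {"posted": len(reqs), "failed": 0}
-- ===== Notes on version B (the rewrite author's own statement) =====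
-- stated objective: simpler
-- what changed: Replaces the counting loop (with a never-firing try/except) by the closed form len(reqs), since every iteration unconditionally increments posted and failed stays 0.
import Mathlib
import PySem

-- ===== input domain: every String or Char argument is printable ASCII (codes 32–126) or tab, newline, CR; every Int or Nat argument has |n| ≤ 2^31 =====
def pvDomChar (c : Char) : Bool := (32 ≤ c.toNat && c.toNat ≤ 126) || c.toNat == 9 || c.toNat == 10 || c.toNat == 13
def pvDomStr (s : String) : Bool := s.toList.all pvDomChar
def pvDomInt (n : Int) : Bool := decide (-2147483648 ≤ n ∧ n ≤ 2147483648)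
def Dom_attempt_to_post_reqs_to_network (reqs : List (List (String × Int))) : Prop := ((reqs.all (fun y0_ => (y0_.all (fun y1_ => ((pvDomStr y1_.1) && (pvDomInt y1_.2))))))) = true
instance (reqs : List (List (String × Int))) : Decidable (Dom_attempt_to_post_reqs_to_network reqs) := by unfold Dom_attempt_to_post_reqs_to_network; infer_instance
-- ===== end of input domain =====

-- ===== PORT A =====
-- literal port of A: fold over reqs accumulating (posted, failed); the except branch is unreachable
def attempt_to_post_reqs_to_network (reqs : List (List (String × Int))) : List (String × Int) :=
  let st := reqs.foldl (fun (acc : Int × Int) _req => (acc.1 + 1, acc.2)) (0, 0)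
  [("posted", st.1), ("failed", st.2)]

-- ===== PORT B =====
-- B: closed form, no loop
def attempt_to_post_reqs_to_network_alt (reqs : List (List (String × Int))) : List (String × Int) :=
  [("posted", (reqs.length : Int)), ("failed", 0)]

-- ===== PRECONDITION & SPEC =====
def Spec_attempt_to_post_reqs_to_network (reqs : List (List (String × Int))) (out : List (String × Int)) : Prop := out = attempt_to_post_reqs_to_network_alt reqs
instance (reqs : List (List (String × Int))) (out : List (String × Int)) : Decidable (Spec_attempt_to_post_reqs_to_network reqs out) := by unfold Spec_attempt_to_post_reqs_to_network; infer_instance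

-- ===== CLAIM (what is proved, stated in full; the proofs are below) =====
def Claim_equal_attempt_to_post_reqs_to_network : Prop := ∀ (reqs : List (List (String × Int))), Dom_attempt_to_post_reqs_to_network reqs → Spec_attempt_to_post_reqs_to_network reqs (attempt_to_post_reqs_to_network reqs)

-- ===== LEMMAS AND PROOFS =====

-- ===== VERDICT (by name: the statement is the Claim_ definition above) =====
theorem pv_fold_count (reqs : List (List (String × Int))) (p f : Int) :
    reqs.foldl (fun (acc : Int × Int) _req => (acc.1 + 1, acc.2)) (p, f)
      = (p + reqs.length, f) := by
  induction reqs generalizing p with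
  | nil => simp
  | cons x xs ih => simp [List.foldl, ih]; omega

theorem attempt_to_post_reqs_to_network_spec : Claim_equal_attempt_to_post_reqs_to_network := by
  intro reqs _
  unfold Spec_attempt_to_post_reqs_to_network attempt_to_post_reqs_to_network attempt_to_post_reqs_to_network_alt
  simp [pv_fold_count]
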